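-- pv_equiv track=rewrite | github.com/szymonfica/ai | 2/1.py | clear_row_domain
-- ===== SOURCE A (Python) =====
-- def clear_row_domain(cells, domain, color):
--     for r, c in cells:
--         incorrect = []
--         for solution in domain[c]:
--             if solution[r] != color:
--                 incorrect.append(solution)
--         for rm in incorrect:
--             domain[c] -= {rm}
--     return domain
-- ===== SOURCE B (Python) =====
-- def clear_row_domain(cells, domain, color):
--     index = {}
--     for r, c in cells:
--         index.setdefault(c, []).append(r)
--     for c, rows in index.items():
--         bad = {s for s in domain[c] if any(s[r] != color for r in rows)}
--         domain[c].difference_update(bad)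
--     return domain
-- ===== Notes on version B (the rewrite author's own statement) =====
-- stated objective: alternative
-- what changed: B first builds a column->rows index dict from cells, then filters each referenced column's set in a single pass with the combined predicate (one difference_update per column), instead of A's per-cell rescan of the same column followed by one-by-one set removals.
import Mathlib
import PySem

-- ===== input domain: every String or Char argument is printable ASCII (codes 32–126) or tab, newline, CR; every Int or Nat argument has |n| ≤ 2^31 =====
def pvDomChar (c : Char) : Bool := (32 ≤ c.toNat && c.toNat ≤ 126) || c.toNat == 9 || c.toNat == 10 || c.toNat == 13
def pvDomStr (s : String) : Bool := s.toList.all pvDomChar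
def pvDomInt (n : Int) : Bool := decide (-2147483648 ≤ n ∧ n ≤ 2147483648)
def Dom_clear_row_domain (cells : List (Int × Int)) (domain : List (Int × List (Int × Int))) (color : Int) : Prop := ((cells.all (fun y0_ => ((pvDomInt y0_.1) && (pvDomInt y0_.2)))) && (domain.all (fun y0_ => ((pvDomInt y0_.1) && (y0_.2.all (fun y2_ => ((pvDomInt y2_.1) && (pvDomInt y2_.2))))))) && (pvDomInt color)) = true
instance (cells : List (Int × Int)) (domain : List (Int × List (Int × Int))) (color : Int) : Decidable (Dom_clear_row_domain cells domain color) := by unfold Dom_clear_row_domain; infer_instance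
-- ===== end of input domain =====

-- B replaces A's per-cell rescan-and-remove of the same column set by a column→rows index and
-- one combined filtering pass per column (objective: alternative decomposition). Both the Python
-- original and B mutate the sets stored in `domain` in place; the equivalence proved here is
-- about the returned value.

-- ===== PORT A =====
-- shared modelling of Python `solution[r]` on a 2-tuple: IndexError ↦ none
def pvSolAt (sol : Int × Int) (r : Int) : Option Int := PySem.List.pyGet? [sol.1, sol.2] r

-- in-place update of the (first) entry of the dict with key c (dict keys are unique in Python)
def pvDictModify (d : List (Int × List (Int × Int))) (c : Int) (f : List (Int × Int) → List (Int × Int)) : List (Int × List (Int × Int)) :=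
  match d with
  | [] => []
  | (k, v) :: t => if k = c then (k, f v) :: t else (k, v) :: pvDictModify t c f

def clear_row_domain (cells : List (Int × Int)) (domain : List (Int × List (Int × Int))) (color : Int) : List (Int × List (Int × Int)) :=
  cells.foldl (fun dom rc =>
    -- incorrect = [solution for solution in domain[c] if solution[r] != color]
    let incorrect := ((dom.lookup rc.2).getD []).foldl
      (fun acc sol => if pvSolAt sol rc.1 ≠ some color then acc ++ [sol] else acc) []
    -- for rm in incorrect: domain[c] -= {rm}
    incorrect.foldl (fun d rm => pvDictModify d rc.2 (fun s => s.filter (fun x => x ≠ rm))) dom)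
    domain

-- ===== PORT B =====
def clear_row_domain_alt (cells : List (Int × Int)) (domain : List (Int × List (Int × Int))) (color : Int) : List (Int × List (Int × Int)) :=
  -- index = {}; for r, c in cells: index.setdefault(c, []).append(r)
  let index : PySem.Dict Int (List Int) :=
    cells.foldl (fun d rc => d.modify rc.2 [] (fun l => l ++ [rc.1])) PySem.Dict.empty
  -- for c, rows in index.items(): bad = {s in domain[c] | any(s[r] != color for r in rows)}; domain[c] -= bad
  index.items.foldl (fun dom cr =>
    let bad := ((dom.lookup cr.1).getD []).filter
      (fun s => cr.2.any (fun r => pvSolAt s r ≠ some color))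
    pvDictModify dom cr.1 (fun v => v.filter (fun x => ¬ x ∈ bad))) domain

-- "solution is removed by row r" as a Boolean predicate
def pvBad (color : Int) (r : Int) (sol : Int × Int) : Bool := ! decide (pvSolAt sol r = some color)

-- ===== PRECONDITION & SPEC =====
-- Pre_ excludes assoc lists with duplicate keys (they represent no Python dict), cells whose
-- column is not a key of domain (A raises KeyError there), and cells whose out-of-range row
-- index is reached while the column's set is still nonempty, i.e. unless every solution of
-- that column was already removed by an earlier cell (A raises IndexError there).
def Pre_clear_row_domain (cells : List (Int × Int)) (domain : List (Int × List (Int × Int))) (color : Int) : Prop :=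
  (domain.map (·.1)).Nodup ∧
  ∀ i, ∀ h : i < cells.length,
    (domain.lookup (cells[i]'h).2).isSome ∧
    ((-2 ≤ (cells[i]'h).1 ∧ (cells[i]'h).1 ≤ 1) ∨
      ∀ sol ∈ (domain.lookup (cells[i]'h).2).getD [],
        ∃ j, ∃ hj : j < i, (cells[j]'(Nat.lt_trans hj h)).2 = (cells[i]'h).2 ∧
          pvBad color (cells[j]'(Nat.lt_trans hj h)).1 sol = true)
instance (cells : List (Int × Int)) (domain : List (Int × List (Int × Int))) (color : Int) : Decidable (Pre_clear_row_domain cells domain color) := by unfold Pre_clear_row_domain; infer_instance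

def pvWitness_clear_row_domain : (List (Int × Int)) × (List (Int × List (Int × Int))) × Int :=
  ([(0, 1), (1, 1)], [(1, [(5, 7), (5, 5)]), (2, [(0, 0)])], 5)

def Spec_clear_row_domain (cells : List (Int × Int)) (domain : List (Int × List (Int × Int))) (color : Int) (out : List (Int × List (Int × Int))) : Prop := out = clear_row_domain_alt cells domain color
instance (cells : List (Int × Int)) (domain : List (Int × List (Int × Int))) (color : Int) (out : List (Int × List (Int × Int))) : Decidable (Spec_clear_row_domain cells domain color out) := by unfold Spec_clear_row_domain; infer_instance

-- ===== CLAIM (what is proved, stated in full; the proofs are below) =====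
def Claim_equal_clear_row_domain : Prop := ∀ (cells : List (Int × Int)) (domain : List (Int × List (Int × Int))) (color : Int), Dom_clear_row_domain cells domain color → Pre_clear_row_domain cells domain color → Spec_clear_row_domain cells domain color (clear_row_domain cells domain color)

-- ===== LEMMAS AND PROOFS =====

-- the rows of cells constraining column c, in order
def pvRowsOf (cells : List (Int × Int)) (c : Int) : List Int :=
  (cells.filter (fun rc => rc.2 = c)).map (·.1)

-- the common canonical value of both ports (on nodup-key dicts)
def pvCanon (cells : List (Int × Int)) (domain : List (Int × List (Int × Int))) (color : Int) : List (Int × List (Int × Int)) :=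
  domain.map (fun kv => (kv.1, kv.2.filter (fun s => ! (pvRowsOf cells kv.1).any (fun r => pvBad color r s))))



-- pvDictModify with the identity is the identity
theorem pvDictModify_id (d : List (Int × List (Int × Int))) (c : Int) :
    pvDictModify d c (fun v => v) = d := by
  induction d with
  | nil => rfl
  | cons kv t ih =>
    cases kv with
    | mk k v => simp only [pvDictModify]; split_ifs <;> simp [ih]

-- two modifications at the same key compose
theorem pvDictModify_comp (d : List (Int × List (Int × Int))) (c : Int)
    (f g : List (Int × Int) → List (Int × Int)) :
    pvDictModify (pvDictModify d c f) c g = pvDictModify d c (fun v => g (f v)) := by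
  induction d with
  | nil => rfl
  | cons kv t ih =>
    cases kv with
    | mk k v =>
      by_cases h : k = c
      · simp [pvDictModify, h]
      · simp [pvDictModify, h, ih]

-- the value the modification acts on is the first-match lookup value
theorem pvDictModify_eq_const (d : List (Int × List (Int × Int))) (c : Int)
    (f : List (Int × Int) → List (Int × Int)) :
    pvDictModify d c f = pvDictModify d c (fun _ => f ((d.lookup c).getD [])) := by
  induction d with
  | nil => rfl
  | cons kv t ih =>
    cases kv with
    | mk k v =>
      by_cases h : k = c
      · simp [pvDictModify, h, List.lookup]
      · have hne : (c == k) = false := by simpa using fun he => h he.symm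
        simp [pvDictModify, h, List.lookup, hne, ih]

-- pvDictModify does not change the key list
theorem pvDictModify_keys (d : List (Int × List (Int × Int))) (c : Int)
    (f : List (Int × Int) → List (Int × Int)) :
    (pvDictModify d c f).map (·.1) = d.map (·.1) := by
  induction d with
  | nil => rfl
  | cons kv t ih =>
    cases kv with
    | mk k v => by_cases h : k = c <;> simp [pvDictModify, h, ih]

theorem pvDictModify_cons_self (k : Int) (v : List (Int × Int)) (t : List (Int × List (Int × Int)))
    (f : List (Int × Int) → List (Int × Int)) :
    pvDictModify ((k, v) :: t) k f = (k, f v) :: t := by simp [pvDictModify]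

theorem pvDictModify_cons_ne (k c : Int) (v : List (Int × Int)) (t : List (Int × List (Int × Int)))
    (f : List (Int × Int) → List (Int × Int)) (h : k ≠ c) :
    pvDictModify ((k, v) :: t) c f = (k, v) :: pvDictModify t c f := by simp [pvDictModify, h]

-- a fold of same-key modifications is one modification by the folded function
theorem foldl_pvDictModify (R : List (Int × Int)) (d : List (Int × List (Int × Int))) (c : Int)
    (h : Int × Int → List (Int × Int) → List (Int × Int)) :
    R.foldl (fun d rm => pvDictModify d c (h rm)) d
      = pvDictModify d c (fun v => R.foldl (fun v rm => h rm v) v) := by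
  induction R generalizing d with
  | nil => simp [pvDictModify_id]
  | cons rm R ih => simp [List.foldl_cons, ih, pvDictModify_comp]

-- removing every element of R (all occurrences) is a filter
theorem foldl_remove_eq_filter (R l : List (Int × Int)) :
    R.foldl (fun v rm => v.filter (fun x => x ≠ rm)) l = l.filter (fun x => ¬ x ∈ R) := by
  induction R generalizing l with
  | nil => simp
  | cons rm R ih =>
    rw [List.foldl_cons, ih, List.filter_filter]
    apply List.filter_congr
    intro x _
    simp [Bool.and_comm]

-- A's body on one cell collapses to one modification by a combined filter
theorem A_step (dom : List (Int × List (Int × Int))) (r c color : Int) :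
    (let incorrect := ((dom.lookup c).getD []).foldl
        (fun acc sol => if pvSolAt sol r ≠ some color then acc ++ [sol] else acc) [];
      incorrect.foldl (fun d rm => pvDictModify d c (fun s => s.filter (fun x => x ≠ rm))) dom)
    = pvDictModify dom c (fun v => v.filter (fun s => ! pvBad color r s)) := by
  have hinc : ((dom.lookup c).getD []).foldl
      (fun acc sol => if pvSolAt sol r ≠ some color then acc ++ [sol] else acc) []
      = ((dom.lookup c).getD []).filter (fun s => pvBad color r s) := by
    simpa [pvBad] using PySem.List.foldl_append_ite_eq_filter (fun sol => pvSolAt sol r ≠ some color) ((dom.lookup c).getD []) []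
  simp only [hinc, foldl_pvDictModify, foldl_remove_eq_filter]
  rw [pvDictModify_eq_const]
  rw [pvDictModify_eq_const dom c (fun v => v.filter (fun s => ! pvBad color r s))]
  congr 1
  funext _
  apply List.filter_congr
  intro x hx
  simp [List.mem_filter, hx, pvBad]


-- rows of a cons: the head cell contributes iff its column matches
theorem pvRowsOf_cons_self (r c : Int) (cells : List (Int × Int)) :
    pvRowsOf ((r, c) :: cells) c = r :: pvRowsOf cells c := by
  simp [pvRowsOf]

theorem pvRowsOf_cons_ne (r c k : Int) (cells : List (Int × Int)) (h : c ≠ k) :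
    pvRowsOf ((r, c) :: cells) k = pvRowsOf cells k := by
  simp [pvRowsOf, h]

-- two successive bad-row filters merge into one over the concatenated row list
theorem filter_bad_merge (v : List (Int × Int)) (color r : Int) (L : List Int) :
    (v.filter (fun s => ! pvBad color r s)).filter (fun s => ! L.any (fun x => pvBad color x s))
      = v.filter (fun s => ! (r :: L).any (fun x => pvBad color x s)) := by
  rw [List.filter_filter]
  apply List.filter_congr
  intro s _
  simp [List.any_cons, Bool.and_comm]

-- applying one cell's modification to the canonical value prepends the cell
theorem pvCanon_modify (cells : List (Int × Int)) (color r c : Int)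
    (dom : List (Int × List (Int × Int))) (h : (dom.map (·.1)).Nodup) :
    pvCanon cells (pvDictModify dom c (fun v => v.filter (fun s => ! pvBad color r s))) color
      = pvCanon ((r, c) :: cells) dom color := by
  induction dom with
  | nil => rfl
  | cons kv t ih =>
    obtain ⟨k, v⟩ := kv
    simp only [List.map_cons, List.nodup_cons] at h
    by_cases hk : k = c
    · subst hk
      rw [pvDictModify_cons_self]
      simp only [pvCanon, List.map_cons]
      congr 1
      · rw [filter_bad_merge, pvRowsOf_cons_self]
      · apply List.map_congr_left
        intro kv' hkv'
        have hne : kv'.1 ≠ k := by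
          intro he; exact h.1 (he ▸ (List.mem_map_of_mem hkv'))
        rw [pvRowsOf_cons_ne r k kv'.1 cells (fun he => hne he.symm)]
    · rw [pvDictModify_cons_ne _ _ _ _ _ hk]
      simp only [pvCanon, List.map_cons] at *
      congr 1
      · rw [pvRowsOf_cons_ne r c k cells (fun he => hk he.symm)]
      · exact ih h.2

-- A's whole loop computes the canonical value
theorem A_fold (color : Int) (cells : List (Int × Int)) :
    ∀ dom : List (Int × List (Int × Int)), (dom.map (·.1)).Nodup →
    cells.foldl (fun d rc => pvDictModify d rc.2 (fun v => v.filter (fun s => ! pvBad color rc.1 s))) dom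
      = pvCanon cells dom color := by
  induction cells with
  | nil => intro dom _; simp [pvCanon, pvRowsOf]
  | cons rc cells ih =>
    intro dom h
    obtain ⟨r, c⟩ := rc
    rw [List.foldl_cons]
    rw [ih _ (by rw [pvDictModify_keys]; exact h)]
    exact pvCanon_modify cells color r c dom h

-- B's body on one column collapses to one modification by the combined filter
theorem B_step (dom : List (Int × List (Int × Int))) (c color : Int) (rows : List Int) :
    pvDictModify dom c (fun v => v.filter
        (fun x => ! decide (x ∈ ((dom.lookup c).getD []).filter (fun s => rows.any (fun r => ! decide (pvSolAt s r = some color))))))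
      = pvDictModify dom c (fun v => v.filter (fun s => ! rows.any (fun x => pvBad color x s))) := by
  rw [pvDictModify_eq_const]
  rw [pvDictModify_eq_const dom c (fun v => v.filter (fun s => ! rows.any (fun x => pvBad color x s)))]
  congr 1
  funext _
  apply List.filter_congr
  intro x hx
  cases hb : rows.any (fun r => pvBad color r x) <;>
    simp_all [List.mem_filter, List.any_eq_true, pvBad]

-- helper: a key absent from an association list looks up to none
theorem lookup_eq_none_of_not_mem (idx : List (Int × List Int)) (c : Int)
    (h : ¬ c ∈ idx.map (·.1)) : idx.lookup c = none := by
  induction idx with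
  | nil => rfl
  | cons p t ih =>
    obtain ⟨a, b⟩ := p
    simp only [List.map_cons, List.mem_cons] at h
    push Not at h
    have hb : (c == a) = false := by simpa using h.1
    simp [List.lookup, hb, ih h.2]

-- one combined modification, seen through the canonical map for the remaining index
theorem modfold_modify (color c : Int) (rows : List Int) (rest : List (Int × List Int))
    (dom : List (Int × List (Int × Int)))
    (hc : ¬ c ∈ rest.map (·.1)) (h : (dom.map (·.1)).Nodup) :
    (pvDictModify dom c (fun v => v.filter (fun s => ! rows.any (fun x => pvBad color x s)))).map
        (fun kv => (kv.1, kv.2.filter (fun s => ! ((rest.lookup kv.1).getD []).any (fun x => pvBad color x s))))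
      = dom.map (fun kv => (kv.1, kv.2.filter
          (fun s => ! ((((c, rows) :: rest : List (Int × List Int)).lookup kv.1).getD []).any (fun x => pvBad color x s)))) := by
  induction dom with
  | nil => rfl
  | cons kv t ih =>
    obtain ⟨k, v⟩ := kv
    simp only [List.map_cons, List.nodup_cons] at h
    by_cases hk : k = c
    · subst hk
      rw [pvDictModify_cons_self]
      simp only [List.map_cons]
      congr 1
      · rw [lookup_eq_none_of_not_mem rest k hc]
        simp [List.filter_filter, List.lookup]
      · apply List.map_congr_left
        intro kv' hkv'
        have hne : kv'.1 ≠ k := by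
          intro he; exact h.1 (he ▸ (List.mem_map_of_mem hkv'))
        have hb : (kv'.1 == k) = false := by simpa using hne
        simp only [List.lookup, hb]
    · rw [pvDictModify_cons_ne _ _ _ _ _ hk]
      simp only [List.map_cons]
      congr 1
      · have hb : (k == c) = false := by simpa using hk
        simp only [List.lookup, hb]
      · exact ih h.2

-- a fold of combined modifications over an index with distinct keys
theorem modfold (color : Int) :
    ∀ (idx : List (Int × List Int)) (dom : List (Int × List (Int × Int))),
    (idx.map (·.1)).Nodup → (dom.map (·.1)).Nodup →
    idx.foldl (fun d cr => pvDictModify d cr.1 (fun v => v.filter (fun s => ! cr.2.any (fun x => pvBad color x s)))) dom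
      = dom.map (fun kv => (kv.1, kv.2.filter
          (fun s => ! ((idx.lookup kv.1).getD []).any (fun x => pvBad color x s)))) := by
  intro idx
  induction idx with
  | nil => intro dom _ _; simp [List.lookup]
  | cons cr rest ih =>
    intro dom hidx hdom
    obtain ⟨c, rows⟩ := cr
    simp only [List.map_cons, List.nodup_cons] at hidx
    rw [List.foldl_cons]
    rw [ih _ hidx.2 (by rw [pvDictModify_keys]; exact hdom)]
    exact modfold_modify color c rows rest dom hidx.1 hdom

-- Dict.get? on a literal dict is first-match association lookup
theorem dictGet_eq_lookup (l : List (Int × List Int)) (k : Int) :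
    (PySem.Dict.mk l).get? k = l.lookup k := by
  induction l with
  | nil => simp [PySem.Dict.get?]
  | cons p t ih =>
    obtain ⟨a, b⟩ := p
    rw [PySem.Dict.get?_mk_cons]
    by_cases hk : k = a
    · subst hk; simp [List.lookup]
    · have h1 : (a == k) = false := by simpa using (Ne.symm hk)
      have h2 : (k == a) = false := by simpa using hk
      simp [List.lookup, h1, h2, ih]

-- the index built by B stores exactly the rows of each column
theorem index_getD (cells : List (Int × Int)) (k : Int) :
    (cells.foldl (fun d rc => d.modify rc.2 [] (fun l => l ++ [rc.1])) PySem.Dict.empty).getD k []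
      = pvRowsOf cells k := by
  rw [show (cells.foldl (fun d rc => d.modify rc.2 [] (fun l => l ++ [rc.1])) PySem.Dict.empty)
      = ((cells.map (fun rc => (rc.2, rc.1))).foldl (fun d p => d.modify p.1 [] (fun l => l ++ [p.2])) PySem.Dict.empty) by
    rw [List.foldl_map]]
  rw [PySem.Dict.getD_foldl_modify_append]
  simp only [PySem.Dict.getD_empty, List.nil_append, List.filter_map, Function.comp_def, pvRowsOf, List.map_map]
  congr 1

-- the index built by B has pairwise distinct keys
theorem index_keys_nodup (cells : List (Int × Int)) :
    ((cells.foldl (fun d rc => d.modify rc.2 [] (fun l => l ++ [rc.1])) PySem.Dict.empty).items.map (·.1)).Nodup := by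
  have := PySem.Dict.nodup_keys_foldl_modify_key cells (fun rc => rc.2) []
      (fun _ rc => (fun l => l ++ [rc.1])) PySem.Dict.empty (by simp)
  simpa [PySem.Dict.keys] using this


-- A's port equals the canonical value
theorem A_eq_canon (cells : List (Int × Int)) (domain : List (Int × List (Int × Int))) (color : Int)
    (hnd : (domain.map (·.1)).Nodup) :
    clear_row_domain cells domain color = pvCanon cells domain color := by
  unfold clear_row_domain
  exact (PySem.List.foldl_congr_mem cells _
    (fun (dom : List (Int × List (Int × Int))) (rc : Int × Int) =>
      pvDictModify dom rc.2 (fun v => v.filter (fun s => ! pvBad color rc.1 s)))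
    domain
    (fun dom rc _ => A_step dom rc.1 rc.2 color)).trans (A_fold color cells domain hnd)

-- B's port equals the canonical value
theorem B_eq_canon (cells : List (Int × Int)) (domain : List (Int × List (Int × Int))) (color : Int)
    (hnd : (domain.map (·.1)).Nodup) :
    clear_row_domain_alt cells domain color = pvCanon cells domain color := by
  unfold clear_row_domain_alt
  simp only []
  refine (PySem.List.foldl_congr_mem _ _
    (fun (dom : List (Int × List (Int × Int))) (cr : Int × List Int) =>
      pvDictModify dom cr.1 (fun v => v.filter (fun s => ! cr.2.any (fun x => pvBad color x s))))
    domain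
    (fun dom cr _ => ?_)).trans ?_
  · simp only [ne_eq, decide_not]
    exact B_step dom cr.1 color cr.2
  rw [modfold color _ domain (index_keys_nodup cells) hnd]
  unfold pvCanon
  apply List.map_congr_left
  intro kv _
  rw [show ((cells.foldl (fun d rc => d.modify rc.2 [] (fun l => l ++ [rc.1])) PySem.Dict.empty).items.lookup kv.1)
      = (cells.foldl (fun d rc => d.modify rc.2 [] (fun l => l ++ [rc.1])) PySem.Dict.empty).get? kv.1 from
    (dictGet_eq_lookup _ kv.1).symm]
  rw [← PySem.Dict.getD_eq_get?_getD]
  rw [index_getD cells kv.1]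

theorem clear_row_domain_spec : Claim_equal_clear_row_domain := by
  intro cells domain color _ hpre
  unfold Spec_clear_row_domain
  rw [A_eq_canon cells domain color hpre.1, B_eq_canon cells domain color hpre.1]
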